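-- pv_equiv track=rewrite | github.com/abbyambita/SPAM-Filter-Naive-Bayes-Implementation | index.py | getFeatureMatrix
-- ===== SOURCE A (Python) =====
-- def getFeatureMatrix(dataset, dictionary):
-- 	feature_matrix = []
-- 	for each_file in dataset:
-- 		feature_vector = [0] * len(dictionary)
-- 		for each_word in each_file:
-- 			for d,dicword in enumerate(dictionary.keys()):
-- 				if each_word == dicword:
-- 					feature_vector[d] = 1
-- 		feature_matrix.append(feature_vector)
-- 	return feature_matrix
-- ===== SOURCE B (Python) =====
-- def getFeatureMatrix(dataset, dictionary):
-- 	feature_matrix = []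
-- 	for each_file in dataset:
-- 		word_set = set(each_file)
-- 		feature_matrix.append([1 if dicword in word_set else 0 for dicword in dictionary])
-- 	return feature_matrix
-- ===== Notes on version B (the rewrite author's own statement) =====
-- stated objective: faster
-- what changed: Inverts the traversal: per file build a set of its words once, then produce the vector by iterating the dictionary keys and testing set membership, instead of a positional linear scan over all dictionary keys for every word of the file.
import Mathlib
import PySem

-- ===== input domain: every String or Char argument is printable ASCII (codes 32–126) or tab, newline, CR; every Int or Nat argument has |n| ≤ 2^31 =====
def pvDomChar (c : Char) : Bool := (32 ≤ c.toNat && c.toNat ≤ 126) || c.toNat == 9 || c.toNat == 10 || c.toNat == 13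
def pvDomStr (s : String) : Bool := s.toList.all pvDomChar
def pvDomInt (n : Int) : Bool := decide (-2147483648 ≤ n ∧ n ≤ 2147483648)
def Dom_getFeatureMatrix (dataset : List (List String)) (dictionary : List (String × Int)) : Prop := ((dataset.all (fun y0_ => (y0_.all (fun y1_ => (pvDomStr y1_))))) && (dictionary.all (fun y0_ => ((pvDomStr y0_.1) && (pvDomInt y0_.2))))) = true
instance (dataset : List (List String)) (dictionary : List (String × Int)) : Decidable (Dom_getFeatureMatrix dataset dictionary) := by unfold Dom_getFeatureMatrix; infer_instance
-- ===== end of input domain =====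

-- B builds a per-file word set and maps over the dictionary (membership test) instead of a positional scan over all keys for every word.
-- ===== PORT A =====
def getFeatureMatrix (dataset : List (List String)) (dictionary : List (String × Int)) : List (List Int) :=
  dataset.foldl (fun feature_matrix each_file =>
    feature_matrix ++
      [each_file.foldl (fun feature_vector each_word =>
          (PySem.List.enumerate (dictionary.map Prod.fst) 0).foldl
            (fun fv p => if each_word == p.2 then PySem.List.pySetD fv p.1 1 else fv)
            feature_vector)
        (List.replicate dictionary.length (0 : Int))]) []

-- ===== PORT B =====
def getFeatureMatrix_alt (dataset : List (List String)) (dictionary : List (String × Int)) : List (List Int) :=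
  dataset.map (fun each_file =>
    let word_set : PySem.Set String := PySem.Set.ofList each_file
    dictionary.map (fun kv => if PySem.Set.contains word_set kv.1 then (1 : Int) else 0))

-- ===== PRECONDITION & SPEC =====
def Spec_getFeatureMatrix (dataset : List (List String)) (dictionary : List (String × Int)) (out : List (List Int)) : Prop := out = getFeatureMatrix_alt dataset dictionary
instance (dataset : List (List String)) (dictionary : List (String × Int)) (out : List (List Int)) : Decidable (Spec_getFeatureMatrix dataset dictionary out) := by unfold Spec_getFeatureMatrix; infer_instance

-- ===== CLAIM (what is proved, stated in full; the proofs are below) =====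
def Claim_equal_getFeatureMatrix : Prop := ∀ (dataset : List (List String)) (dictionary : List (String × Int)), Dom_getFeatureMatrix dataset dictionary → Spec_getFeatureMatrix dataset dictionary (getFeatureMatrix dataset dictionary)

-- ===== LEMMAS AND PROOFS =====

-- step of A's innermost loop, for a fixed word
def pvStep (w : String) : List Int → Int × String → List Int :=
  fun fv p => if w == p.2 then PySem.List.pySetD fv p.1 1 else fv

theorem pvStep_def (w : String) :
    (fun fv (p : Int × String) => if w == p.2 then PySem.List.pySetD fv p.1 1 else fv) = pvStep w := rfl

-- A's innermost loop writes 1 at every position whose key equals w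
theorem pv_inner (w : String) (keys : List String) (pre rest : List Int)
    (h : rest.length = keys.length) :
    (PySem.List.enumerate keys (pre.length : Int)).foldl (pvStep w) (pre ++ rest)
      = pre ++ List.zipWith (fun k x => if w == k then (1 : Int) else x) keys rest := by
  induction keys generalizing pre rest with
  | nil =>
    cases rest with
    | nil => simp [PySem.List.enumerate_nil]
    | cons a l => simp at h
  | cons k ks ih =>
    cases rest with
    | nil => simp at h
    | cons x rest' =>
      simp only [List.length_cons, Nat.succ.injEq] at h
      rw [PySem.List.enumerate_cons, List.foldl_cons]
      have hstep : pvStep w (pre ++ x :: rest') ((pre.length : Int), k)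
          = pre ++ (if w == k then (1 : Int) else x) :: rest' := by
        unfold pvStep
        by_cases hw : w == k
        · simp only [hw, if_true, PySem.List.pySetD_natCast]
          rw [List.set_append]
          simp
        · simp [hw]
      rw [hstep]
      have hlen : ((pre.length : Int) + 1) = (((pre ++ [if w == k then (1 : Int) else x]).length : Nat) : Int) := by
        simp
      rw [hlen]
      have := ih (pre ++ [if w == k then (1 : Int) else x]) rest' h
      rw [List.append_assoc] at this
      simp only [List.singleton_append] at this
      rw [this, List.zipWith_cons_cons, List.append_assoc, List.singleton_append]

-- composing two zipWith passes over the same key list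
theorem pv_zip_zip (f g : String → Int → Int) (keys : List String) (fv : List Int) :
    List.zipWith g keys (List.zipWith f keys fv)
      = List.zipWith (fun k x => g k (f k x)) keys fv := by
  induction keys generalizing fv with
  | nil => simp
  | cons k ks ih =>
    cases fv with
    | nil => simp
    | cons x xs => simp [ih]

-- A's loop over the words of one file, characterized
theorem pv_outer (words keys : List String) (fv : List Int) (h : fv.length = keys.length) :
    words.foldl (fun fv w => (PySem.List.enumerate keys 0).foldl (pvStep w) fv) fv
      = List.zipWith (fun k x => if k ∈ words then (1 : Int) else x) keys fv := by
  induction words generalizing fv with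
  | nil =>
    simp only [List.foldl_nil, List.not_mem_nil, if_false]
    symm
    calc List.zipWith (fun _ x => x) keys fv = fv.take keys.length := by
          clear h
          induction keys generalizing fv with
          | nil => simp
          | cons k ks ih => cases fv <;> simp [ih]
      _ = fv := by rw [← h, List.take_length]
  | cons w ws ih =>
    rw [List.foldl_cons]
    have h0 : (PySem.List.enumerate keys 0).foldl (pvStep w) fv
        = List.zipWith (fun k x => if w == k then (1 : Int) else x) keys fv := by
      have := pv_inner w keys [] fv h
      simpa using this
    rw [h0, ih _ (by rw [List.length_zipWith, h]; omega), pv_zip_zip]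
    have hfun : (fun (k : String) (x : Int) => if k ∈ ws then (1 : Int) else if w == k then 1 else x)
        = (fun k x => if k ∈ w :: ws then (1 : Int) else x) := by
      funext k x
      by_cases hm : k ∈ ws
      · simp [hm]
      · by_cases he : w = k
        · simp [he, hm]
        · have hk : k ∉ w :: ws := by simp [hm, Ne.symm he]
          simp [hm, hk, show (w == k) = false by simpa using he]
    rw [hfun]

-- zipWith against the all-zero vector is a map
theorem pv_zip_zero (f : String → Int → Int) (keys : List String) :
    List.zipWith f keys (List.replicate keys.length 0)
      = keys.map (fun k => f k 0) := by
  induction keys with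
  | nil => simp
  | cons k ks ih => simpa [List.replicate_succ] using ih

-- A's one-row computation equals B's one-row computation
theorem pv_row (each_file : List String) (dictionary : List (String × Int)) :
    each_file.foldl (fun feature_vector each_word =>
        (PySem.List.enumerate (dictionary.map Prod.fst) 0).foldl
          (fun fv p => if each_word == p.2 then PySem.List.pySetD fv p.1 1 else fv)
          feature_vector)
      (List.replicate dictionary.length (0 : Int))
      = dictionary.map (fun kv =>
          if PySem.Set.contains (PySem.Set.ofList each_file) kv.1 then (1 : Int) else 0) := by
  simp only [pvStep_def]
  have hl : (List.replicate dictionary.length (0 : Int)).length = (dictionary.map Prod.fst).length := by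
    simp
  rw [show List.replicate dictionary.length (0 : Int)
        = List.replicate (dictionary.map Prod.fst).length (0 : Int) by simp,
      pv_outer each_file (dictionary.map Prod.fst) _ (by simp),
      pv_zip_zero, List.map_map]
  apply List.map_congr_left
  intro kv _
  by_cases hm : kv.1 ∈ each_file
  · simp [Function.comp, hm, PySem.Set.mem_ofList]
  · simp [Function.comp, hm, PySem.Set.mem_ofList]

-- appending rows one by one is a map
theorem pv_foldl_append {α β : Type} (f : α → β) (l : List α) (acc : List β) :
    l.foldl (fun a x => a ++ [f x]) acc = acc ++ l.map f := by
  induction l generalizing acc with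
  | nil => simp
  | cons x xs ih => simp [ih]


-- ===== VERDICT (by name: the statement is the Claim_ definition above) =====
theorem getFeatureMatrix_spec : Claim_equal_getFeatureMatrix := by
  intro dataset dictionary _
  unfold Spec_getFeatureMatrix getFeatureMatrix getFeatureMatrix_alt
  refine (pv_foldl_append (fun each_file =>
      each_file.foldl (fun feature_vector each_word =>
        (PySem.List.enumerate (dictionary.map Prod.fst) 0).foldl
          (fun fv p => if each_word == p.2 then PySem.List.pySetD fv p.1 1 else fv)
          feature_vector)
        (List.replicate dictionary.length (0 : Int))) dataset []).trans ?_
  simp only [List.nil_append]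
  apply List.map_congr_left
  intro each_file _
  exact pv_row each_file dictionary
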